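-- pv_equiv track=rewrite | github.com/tom-mi/python-async2v | async2v/components/pygame/util/display.py | possible_screen_layouts
-- ===== SOURCE A (Python) =====
-- from typing import Tuple, NamedTuple, Optional, List, Callable, Union
--
-- def possible_screen_layouts(number_of_frames: int) -> List[Tuple[int, int]]:
--     possible_layouts = []
--     best_n_y = number_of_frames + 1
--     for n_x in range(1, number_of_frames + 1):
--         for n_y in range(1, best_n_y):
--             if n_x * n_y >= number_of_frames:
--                 best_n_y = n_y
--                 possible_layouts.append((n_x, n_y))
--                 break
--
--     return possible_layouts
-- ===== SOURCE B (Python) =====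
-- def possible_screen_layouts(number_of_frames):
--     N = number_of_frames
--     xs = range(1, N + 1)
--     ceils = [-(-N // x) for x in xs]
--     return [(x, c) for x, c, p in zip(xs, ceils, [N + 1] + ceils) if c < p]
-- ===== Notes on version B (the rewrite author's own statement) =====
-- stated objective: faster
-- what changed: Instead of A's stateful double loop with a running best, B builds the list of ceiling divisions ceil(N/x) once and keeps, by zipping it with its own shifted copy, exactly the positions where the (nonincreasing) ceiling strictly drops.
import Mathlib
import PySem

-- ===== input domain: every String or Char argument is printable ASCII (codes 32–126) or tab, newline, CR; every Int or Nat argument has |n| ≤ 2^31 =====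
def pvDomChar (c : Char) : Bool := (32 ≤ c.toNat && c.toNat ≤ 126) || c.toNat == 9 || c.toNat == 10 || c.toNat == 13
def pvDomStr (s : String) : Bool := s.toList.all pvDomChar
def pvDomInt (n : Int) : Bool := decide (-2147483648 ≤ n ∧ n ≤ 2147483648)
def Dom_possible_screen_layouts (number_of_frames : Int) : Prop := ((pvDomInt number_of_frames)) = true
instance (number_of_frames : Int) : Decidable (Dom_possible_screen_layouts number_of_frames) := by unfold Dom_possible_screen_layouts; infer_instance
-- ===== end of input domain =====

-- B replaces A's stateful double loop by one pass of ceiling divisions zipped with its shifted self (objective: faster; asymptotic).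

-- ===== PORT A =====
-- inner 'for n_y in range(1, best_n_y): if … break' = first element of the range satisfying the test
def possible_screen_layouts (number_of_frames : Int) : List (Int × Int) :=
  (((PySem.List.pyRange 1 (number_of_frames + 1) 1).foldl
      (fun (st : List (Int × Int) × Int) n_x =>
        match (PySem.List.pyRange 1 st.2 1).find?
            (fun n_y => decide (n_x * n_y ≥ number_of_frames)) with
        | some n_y => (st.1 ++ [(n_x, n_y)], n_y)
        | none => st)
      ([], number_of_frames + 1))).1

-- ===== PORT B =====
-- zip(xs, ceils, [N+1]+ceils) becomes a nested zip (truncating like Python's zip);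
-- the comprehension's filter becomes filterMap
def possible_screen_layouts_alt (number_of_frames : Int) : List (Int × Int) :=
  let N := number_of_frames
  let xs := PySem.List.pyRange 1 (N + 1) 1
  let ceils := xs.map (fun x => -(PySem.Int.floordiv (-N) x))
  ((xs.zip ceils).zip ((N + 1) :: ceils)).filterMap
    (fun t => if t.1.2 < t.2 then some t.1 else none)

-- ===== PRECONDITION & SPEC =====
def Spec_possible_screen_layouts (number_of_frames : Int) (out : List (Int × Int)) : Prop := out = possible_screen_layouts_alt number_of_frames
instance (number_of_frames : Int) (out : List (Int × Int)) : Decidable (Spec_possible_screen_layouts number_of_frames out) := by unfold Spec_possible_screen_layouts; infer_instance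

-- ===== CLAIM (what is proved, stated in full; the proofs are below) =====
def Claim_equal_possible_screen_layouts : Prop := ∀ (number_of_frames : Int), Dom_possible_screen_layouts number_of_frames → Spec_possible_screen_layouts number_of_frames (possible_screen_layouts number_of_frames)

-- ===== LEMMAS AND PROOFS =====

-- ceil(N / a), the value both programs select per column count a
def pvCeil (N a : Int) : Int := -(PySem.Int.floordiv (-N) a)

theorem pvCeil_bounds (N a : Int) (ha : 0 < a) :
    (pvCeil N a - 1) * a < N ∧ N ≤ pvCeil N a * a :=
  (PySem.Int.neg_floordiv_neg_eq_iff_of_pos ha).mp rfl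

theorem pvCeil_pos (N a : Int) (hN : 1 ≤ N) (ha : 0 < a) : 1 ≤ pvCeil N a := by
  have h := (pvCeil_bounds N a ha).2
  by_contra h0
  push Not at h0
  nlinarith

theorem pvCeil_succ_le (N a : Int) (hN : 1 ≤ N) (ha : 0 < a) :
    pvCeil N (a + 1) ≤ pvCeil N a := by
  have h1 := (pvCeil_bounds N a ha).2
  have h2 := (pvCeil_bounds N (a + 1) (by omega)).1
  have hc := pvCeil_pos N a hN ha
  nlinarith

-- common reference shape: walk a..N carrying the previous ceiling P, keep strict drops
def pvGo (N a P : Int) : List (Int × Int) :=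
  if h : a ≤ N then
    let c := pvCeil N a
    if c < P then (a, c) :: pvGo N (a + 1) c else pvGo N (a + 1) c
  else []
termination_by (N + 1 - a).toNat
decreasing_by all_goals omega

-- find? over an ascending unit range with the monotone predicate 'c ≤ ·' (a ≤ c):
-- returns c if c < b, else none
theorem pv_find_range (c : Int) : ∀ (b a : Int), a ≤ c →
    (PySem.List.pyRange a b 1).find? (fun n_y => decide (c ≤ n_y)) =
      (if c < b then some c else none) := by
  intro b
  suffices H : ∀ (n : Nat) (a : Int), (b - a).toNat = n → a ≤ c →
      (PySem.List.pyRange a b 1).find? (fun n_y => decide (c ≤ n_y)) =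
        (if c < b then some c else none) by
    intro a hac; exact H _ a rfl hac
  intro n
  induction n with
  | zero =>
    intro a hn hac
    have hba : b ≤ a := by omega
    rw [PySem.List.pyRange_one_eq_nil hba]
    simp [List.find?]
    omega
  | succ n ih =>
    intro a hn hac
    have hab : a < b := by omega
    rw [PySem.List.pyRange_one_cons hab]
    by_cases hca : c ≤ a
    · have : a = c := le_antisymm hac hca
      subst this
      simp [List.find?, hab]
    · have h1 : a + 1 ≤ c := by omega
      have : (decide (c ≤ a)) = false := by simp; omega
      simp only [List.find?, this]
      exact ih (a + 1) (by omega) h1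

-- A's fold from column a with running best P (invariant: ceil(N/a) ≤ P) produces pvGo
theorem pvA_go (N : Int) (hN : 1 ≤ N) :
    ∀ (fuel : Nat) (a : Int), (N + 1 - a).toNat = fuel → 1 ≤ a →
      ∀ (acc : List (Int × Int)) (P : Int), (a ≤ N → pvCeil N a ≤ P) →
      ∃ q, (PySem.List.pyRange a (N + 1) 1).foldl
        (fun (st : List (Int × Int) × Int) n_x =>
          match (PySem.List.pyRange 1 st.2 1).find?
              (fun n_y => decide (n_x * n_y ≥ N)) with
          | some n_y => (st.1 ++ [(n_x, n_y)], n_y)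
          | none => st)
        (acc, P) = (acc ++ pvGo N a P, q) := by
  intro fuel
  induction fuel with
  | zero =>
    intro a hf ha acc P _
    have hba : N + 1 ≤ a := by omega
    rw [PySem.List.pyRange_one_eq_nil hba, pvGo]
    simp [show ¬ a ≤ N by omega]
  | succ n ih =>
    intro a hf ha acc P hinv
    have hab : a < N + 1 := by omega
    have haN : a ≤ N := by omega
    have hle := hinv haN
    have hcpos := pvCeil_pos N a hN (by omega)
    rw [PySem.List.pyRange_one_cons hab]
    simp only [List.foldl]
    have hpred : (fun n_y => decide (a * n_y ≥ N)) = (fun n_y => decide (pvCeil N a ≤ n_y)) := by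
      funext n_y
      have hb := pvCeil_bounds N a (by omega)
      simp only [decide_eq_decide, ge_iff_le]
      constructor
      · intro h
        by_contra hlt
        push Not at hlt
        nlinarith
      · intro h
        nlinarith
    rw [hpred, pv_find_range (pvCeil N a) P 1 hcpos]
    have hnext : a + 1 ≤ N → pvCeil N (a + 1) ≤ pvCeil N a := fun _ =>
      pvCeil_succ_le N a hN (by omega)
    rw [pvGo]
    simp only [haN, dite_true]
    by_cases hlt : pvCeil N a < P
    · simp only [hlt, if_true]
      obtain ⟨q, hq⟩ := ih (a + 1) (by omega) (by omega)
        (acc ++ [(a, pvCeil N a)]) (pvCeil N a) hnext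
      exact ⟨q, by simpa using hq⟩
    · have hP : P = pvCeil N a := by omega
      simp only [hlt, if_false]
      rw [hP]
      exact ih (a + 1) (by omega) (by omega) acc (pvCeil N a) hnext
  -- note: in the no-update branch the invariant forces best = ceil, so pvGo's tail matches

-- B's zipped comprehension from column a with previous value P produces pvGo
theorem pvB_go (N : Int) :
    ∀ (fuel : Nat) (a : Int), (N + 1 - a).toNat = fuel →
      ∀ (P : Int),
      (((PySem.List.pyRange a (N + 1) 1).zip
          ((PySem.List.pyRange a (N + 1) 1).map (fun x => pvCeil N x))).zip
        (P :: (PySem.List.pyRange a (N + 1) 1).map (fun x => pvCeil N x))).filterMap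
        (fun t => if t.1.2 < t.2 then some t.1 else none) = pvGo N a P := by
  intro fuel
  induction fuel with
  | zero =>
    intro a hf P
    have hba : N + 1 ≤ a := by omega
    rw [PySem.List.pyRange_one_eq_nil hba, pvGo]
    simp [show ¬ a ≤ N by omega]
  | succ n ih =>
    intro a hf P
    have hab : a < N + 1 := by omega
    rw [PySem.List.pyRange_one_cons hab]
    simp only [List.map_cons, List.zip_cons_cons, List.filterMap_cons]
    rw [pvGo]
    simp only [show a ≤ N by omega, dite_true]
    by_cases hlt : pvCeil N a < P
    · simp only [hlt, if_true]
      rw [ih (a + 1) (by omega) (pvCeil N a)]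
    · simp only [hlt, if_false]
      rw [ih (a + 1) (by omega) (pvCeil N a)]

-- ===== VERDICT (by name: the statement is the Claim_ definition above) =====
theorem possible_screen_layouts_spec : Claim_equal_possible_screen_layouts := by
  intro N _
  unfold Spec_possible_screen_layouts possible_screen_layouts possible_screen_layouts_alt
  by_cases hN : 1 ≤ N
  · obtain ⟨q, hq⟩ := pvA_go N hN (N + 1 - 1).toNat 1 rfl le_rfl [] (N + 1)
      (fun _ => by
        have := (pvCeil_bounds N 1 one_pos).1
        omega)
    rw [hq]
    simp only [List.nil_append]
    exact (pvB_go N (N + 1 - 1).toNat 1 rfl (N + 1)).symm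
  · have hb : N + 1 ≤ 1 := by omega
    simp only
    rw [PySem.List.pyRange_one_eq_nil hb]
    rfl
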